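-- pv_equiv track=rewrite | github.com/DongJiashu/FastSpeech2_finetuning | text/german_mfa_phonofeats_mapping.py | extract_feature_categories
-- ===== SOURCE A (Python) =====
-- def extract_feature_categories(ipa_to_phonemefeats):
--     """
--     get feature_categories from ipa_to_phonemefeats
--     """
--     feature_categories = {}
--
--     for features in ipa_to_phonemefeats.values():
--         for key, value in features.items():
--             if key not in feature_categories:
--                 feature_categories[key] = set()
--             feature_categories[key].add(value)
--
--     for key in feature_categories:
--         feature_categories[key] = sorted(feature_categories[key])
--
--     return feature_categories
-- ===== SOURCE B (Python) =====
-- def extract_feature_categories(ipa_to_phonemefeats):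
--     pairs = [(k, v) for feats in ipa_to_phonemefeats.values() for k, v in feats.items()]
--     keys = list(dict.fromkeys(k for k, _ in pairs))
--     return {k: sorted({v for kk, v in pairs if kk == k}) for k in keys}
-- ===== Notes on version B (the rewrite author's own statement) =====
-- stated objective: alternative
-- what changed: B keeps no dict-of-sets at all: it flattens all (key,value) pairs once, derives the first-seen-order key list with dict.fromkeys, and then builds each output entry by re-scanning the flat pair list per key (a set comprehension filtered on that key, then sorted), trading A's incremental grouping structure for per-key brute-force scans.
import Mathlib
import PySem

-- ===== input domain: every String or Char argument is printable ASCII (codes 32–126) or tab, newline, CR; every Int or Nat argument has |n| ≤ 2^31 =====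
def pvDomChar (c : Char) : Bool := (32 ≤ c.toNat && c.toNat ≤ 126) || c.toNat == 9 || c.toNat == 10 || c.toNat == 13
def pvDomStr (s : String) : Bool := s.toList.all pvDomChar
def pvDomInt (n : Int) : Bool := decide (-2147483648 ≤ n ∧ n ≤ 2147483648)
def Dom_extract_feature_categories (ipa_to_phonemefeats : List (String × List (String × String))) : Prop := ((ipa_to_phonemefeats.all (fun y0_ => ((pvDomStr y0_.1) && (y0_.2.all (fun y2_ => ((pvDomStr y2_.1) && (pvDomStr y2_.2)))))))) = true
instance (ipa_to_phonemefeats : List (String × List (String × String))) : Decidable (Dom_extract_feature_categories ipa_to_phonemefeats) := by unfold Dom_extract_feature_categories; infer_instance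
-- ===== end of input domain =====

-- B keeps no dict-of-sets: one flatten pass, a deduplicated key list, then per-key brute-force
-- re-scans of the flat pair list; objective: alternative (same result, different structure).

-- ===== PORT A =====
-- inner loop body of A: `if key not in fc: fc[key] = set()` then `fc[key].add(value)`
def pvStepA (d : PySem.Dict String (PySem.Set String)) (kv : String × String) :
    PySem.Dict String (PySem.Set String) :=
  let d1 := if d.contains kv.1 then d else d.insert kv.1 PySem.Set.empty
  d1.modify kv.1 PySem.Set.empty (fun s => s.add kv.2)

def extract_feature_categories (ipa_to_phonemefeats : List (String × List (String × String))) : List (String × List String) :=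
  -- for features in ….values(): for key, value in features.items(): …
  let fc := ipa_to_phonemefeats.foldl (fun d p => p.2.foldl pvStepA d) PySem.Dict.empty
  -- for key in fc: fc[key] = sorted(fc[key])   (each key rebound in place, order kept)
  (fc.items.map (fun p => (p.1, PySem.List.sorted p.2 id)))

-- ===== PORT B =====
def extract_feature_categories_alt (ipa_to_phonemefeats : List (String × List (String × String))) : List (String × List String) :=
  -- pairs = [(k, v) for feats in ….values() for k, v in feats.items()]
  let pairs := ipa_to_phonemefeats.flatMap (fun p => p.2)
  -- keys = list(dict.fromkeys(k for k, _ in pairs))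
  let keys := PySem.List.dedup (pairs.map (fun p => p.1))
  -- {k: sorted({v for kk, v in pairs if kk == k}) for k in keys}
  keys.map (fun k =>
    (k, PySem.List.sorted
          (PySem.Set.ofList ((pairs.filter (fun p => p.1 == k)).map (fun p => p.2))) id))

-- ===== PRECONDITION & SPEC =====
def Spec_extract_feature_categories (ipa_to_phonemefeats : List (String × List (String × String))) (out : List (String × List String)) : Prop := out = extract_feature_categories_alt ipa_to_phonemefeats
instance (ipa_to_phonemefeats : List (String × List (String × String))) (out : List (String × List String)) : Decidable (Spec_extract_feature_categories ipa_to_phonemefeats out) := by unfold Spec_extract_feature_categories; infer_instance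

-- ===== CLAIM (what is proved, stated in full; the proofs are below) =====
def Claim_equal_extract_feature_categories : Prop := ∀ (ipa_to_phonemefeats : List (String × List (String × String))), Dom_extract_feature_categories ipa_to_phonemefeats → Spec_extract_feature_categories ipa_to_phonemefeats (extract_feature_categories ipa_to_phonemefeats)

-- ===== LEMMAS AND PROOFS =====

-- A's loop body, written as a single overwriting insert.
theorem pvStepA_eq (d : PySem.Dict String (PySem.Set String)) (kv : String × String) :
    pvStepA d kv = d.insert kv.1 ((d.getD kv.1 PySem.Set.empty).add kv.2) := by
  by_cases h : d.contains kv.1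
  · simp [pvStepA, h, PySem.Dict.modify]
  · simp only [Bool.not_eq_true] at h
    simp [pvStepA, h, PySem.Dict.modify, PySem.Dict.getD_insert_self,
      PySem.Dict.insert_insert_self, PySem.Dict.getD_of_not_contains d _ h]

theorem foldl_pvStepA_eq (l : List (String × String)) (d : PySem.Dict String (PySem.Set String)) :
    l.foldl pvStepA d
      = l.foldl (fun d p => d.insert p.1 ((d.getD p.1 PySem.Set.empty).add p.2)) d := by
  induction l generalizing d with
  | nil => rfl
  | cons p l ih => simp [List.foldl_cons, pvStepA_eq, ih]

-- A's nested loops are one pass over the flattened pair list.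
theorem foldl_nested_eq_flatMap (xss : List (String × List (String × String)))
    (g : PySem.Dict String (PySem.Set String) → (String × String) → PySem.Dict String (PySem.Set String))
    (d : PySem.Dict String (PySem.Set String)) :
    xss.foldl (fun d p => p.2.foldl g d) d = (xss.flatMap (fun p => p.2)).foldl g d := by
  induction xss generalizing d with
  | nil => rfl
  | cons x xss ih => simp [List.foldl_cons, List.flatMap_cons, List.foldl_append, ih]

-- the set stored at k after the pass is the set of all values seen at k, in encounter order
theorem getD_foldl_insert_add (pairs : List (String × String))
    (d : PySem.Dict String (PySem.Set String)) (k : String) :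
    ((pairs.foldl (fun d p => d.insert p.1 ((d.getD p.1 PySem.Set.empty).add p.2)) d).getD k PySem.Set.empty)
      = PySem.Set.update (d.getD k PySem.Set.empty)
          ((pairs.filter (fun p => p.1 == k)).map (fun p => p.2)) := by
  induction pairs generalizing d with
  | nil => rfl
  | cons p l ih =>
    rw [List.foldl_cons, ih]
    by_cases h : p.1 = k
    · subst h
      simp [PySem.Dict.getD_insert_self, PySem.Set.update]
    · have hb : (p.1 == k) = false := beq_eq_false_iff_ne.mpr h
      rw [PySem.Dict.getD_insert_of_ne]
      · simp [hb]
      · exact fun hk => h hk.symm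

theorem extract_feature_categories_eq (ipa : List (String × List (String × String))) :
    extract_feature_categories ipa = extract_feature_categories_alt ipa := by
  unfold extract_feature_categories extract_feature_categories_alt
  dsimp only
  rw [foldl_nested_eq_flatMap _ pvStepA, foldl_pvStepA_eq]
  set pairs := ipa.flatMap (fun p => p.2) with hpairs
  set fc := pairs.foldl (fun d p => d.insert p.1 ((d.getD p.1 PySem.Set.empty).add p.2)) PySem.Dict.empty with hfc
  have hkeysA : fc.keys = PySem.Set.update PySem.Set.empty (pairs.map (fun p => p.1)) := by
    rw [hfc]
    exact PySem.Dict.keys_foldl_insert_key pairs (fun p => p.1)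
      (fun d p => (d.getD p.1 PySem.Set.empty).add p.2) PySem.Dict.empty
  have hndA : fc.keys.Nodup := by
    rw [hfc]
    exact PySem.Dict.nodup_keys_foldl_insert_key pairs (fun p => p.1)
      (fun d p => (d.getD p.1 PySem.Set.empty).add p.2) PySem.Dict.empty List.nodup_nil
  rw [PySem.Dict.items_eq_map_keys fc hndA PySem.Set.empty, hkeysA, List.map_map,
      PySem.List.dedup_eq_ofList]
  have hofl : PySem.Set.ofList (pairs.map (fun p => p.1))
      = PySem.Set.update PySem.Set.empty (pairs.map (fun p => p.1)) := rfl
  rw [hofl]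
  refine List.map_congr_left (fun k _ => ?_)
  simp only [Function.comp]
  rw [hfc, getD_foldl_insert_add]
  rfl

-- ===== VERDICT (by name: the statement is the Claim_ definition above) =====
theorem extract_feature_categories_spec : Claim_equal_extract_feature_categories := by
  intro ipa _
  exact extract_feature_categories_eq ipa
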